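-- pv_equiv track=rewrite | github.com/kostyaCS/puzzle_all | puzzle.py | check_vertical
-- ===== SOURCE A (Python) =====
-- def check_vertical(board: list, index: int) -> bool:
--     """
--     Function checks if there are no same digit numbers
--     in one column on the board.
--     >>> check_vertical(['111***', '1****'], 0)
--     False
--     """
--     stack = []
--     for ind, elem in enumerate(board):
--         for j in range(len(elem)):
--             if j == index and elem[j].isdigit():
--                 stack.append(j)
--     for i in stack:
--         if stack.count(i) > 1:
--             return False
--     return True
-- ===== SOURCE B (Python) =====
-- def check_vertical(board: list, index: int) -> bool:
--     count = 0
--     for row in board: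
--         if 0 <= index < len(row) and row[index].isdigit():
--             count += 1
--             if count > 1:
--                 return False
--     return True
-- ===== Notes on version B (the rewrite author's own statement) =====
-- stated objective: faster
-- what changed: Replaced A's build-a-list-then-quadratic-.count() dedup scan by a single pass over the rows that keeps only a running counter of qualifying cells and short-circuits at the second one.
import Mathlib
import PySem

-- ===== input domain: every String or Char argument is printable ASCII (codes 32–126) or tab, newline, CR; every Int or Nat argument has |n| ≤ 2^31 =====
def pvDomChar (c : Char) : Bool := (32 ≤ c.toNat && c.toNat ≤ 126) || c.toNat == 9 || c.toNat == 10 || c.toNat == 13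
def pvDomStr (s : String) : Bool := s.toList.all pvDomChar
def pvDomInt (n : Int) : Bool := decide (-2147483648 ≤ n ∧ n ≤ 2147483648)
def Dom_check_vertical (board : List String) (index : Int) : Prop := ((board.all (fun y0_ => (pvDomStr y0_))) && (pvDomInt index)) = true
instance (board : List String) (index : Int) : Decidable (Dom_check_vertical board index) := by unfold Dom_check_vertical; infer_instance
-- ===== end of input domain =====

-- B replaces A's list-building plus quadratic .count() scan by a one-pass counter with early exit (faster).
-- ===== PORT A =====
-- second loop of A: 'for i in stack: if stack.count(i) > 1: return False' then 'return True'
def checkLoopA (stack : List Int) : List Int → Bool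
  | [] => true
  | i :: rest => if PySem.List.count stack i > 1 then false else checkLoopA stack rest

def check_vertical (board : List String) (index : Int) : Bool :=
  let stack : List Int := board.foldl (fun st elem =>
    (List.range elem.toList.length).foldl (fun (st : List Int) (j : Nat) =>
      if (j : Int) = index ∧ PySem.Chars.isdigit (PySem.List.pyGetD elem.toList (j : Int) ' ')
      then st ++ [(j : Int)] else st) st) []
  checkLoopA stack stack

-- ===== PORT B =====
def altLoop (index : Int) : List String → Nat → Bool
  | [], _ => true
  | row :: rest, c =>
    if (0 ≤ index ∧ index < (row.toList.length : Int)) ∧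
        PySem.Chars.isdigit (PySem.List.pyGetD row.toList index ' ')
    then (if c + 1 > 1 then false else altLoop index rest (c + 1))
    else altLoop index rest c

def check_vertical_alt (board : List String) (index : Int) : Bool := altLoop index board 0

-- ===== PRECONDITION & SPEC =====
def Spec_check_vertical (board : List String) (index : Int) (out : Bool) : Prop := out = check_vertical_alt board index
instance (board : List String) (index : Int) (out : Bool) : Decidable (Spec_check_vertical board index out) := by unfold Spec_check_vertical; infer_instance

-- ===== CLAIM (what is proved, stated in full; the proofs are below) =====
def Claim_equal_check_vertical : Prop := ∀ (board : List String) (index : Int), Dom_check_vertical board index → Spec_check_vertical board index (check_vertical board index)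

-- ===== LEMMAS AND PROOFS =====
-- a row "qualifies" when the column index is in range and holds a digit
def pvQ (index : Int) (row : String) : Bool :=
  decide (0 ≤ index ∧ index < (row.toList.length : Int)) &&
    PySem.Chars.isdigit (PySem.List.pyGetD row.toList index ' ')

lemma inner_foldl (index : Int) (cs : List Char) (n : Nat) (st : List Int) :
    (List.range n).foldl (fun (st : List Int) (j : Nat) =>
      if (j : Int) = index ∧ PySem.Chars.isdigit (PySem.List.pyGetD cs (j : Int) ' ')
      then st ++ [(j : Int)] else st) st =
    st ++ (if 0 ≤ index ∧ index < (n : Int) ∧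
            PySem.Chars.isdigit (PySem.List.pyGetD cs index ' ')
           then [index] else []) := by
  induction n with
  | zero =>
    simp only [List.range_zero, List.foldl_nil]
    rw [if_neg (by omega)]
    simp
  | succ n ih =>
    rw [List.range_succ, List.foldl_append, ih]
    simp only [List.foldl_cons, List.foldl_nil]
    by_cases h : (n : Int) = index
    · subst h
      split_ifs <;> simp_all <;> omega
    · split_ifs <;> simp_all <;> omega

lemma stack_eq (index : Int) (board : List String) : ∀ (st : List Int),
    board.foldl (fun st elem =>
      (List.range elem.toList.length).foldl (fun (st : List Int) (j : Nat) =>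
        if (j : Int) = index ∧ PySem.Chars.isdigit (PySem.List.pyGetD elem.toList (j : Int) ' ')
        then st ++ [(j : Int)] else st) st) st =
    st ++ List.replicate (board.countP (pvQ index)) index := by
  induction board with
  | nil => intro st; simp
  | cons elem rest ih =>
    intro st
    rw [List.foldl_cons, inner_foldl, ih, List.countP_cons]
    by_cases h : pvQ index elem = true
    · have h' : 0 ≤ index ∧ index < (elem.toList.length : Int) ∧
          PySem.Chars.isdigit (PySem.List.pyGetD elem.toList index ' ') := by
        simp [pvQ] at h; tauto
      rw [if_pos h', h]
      simp [List.replicate_succ]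
    · have h' : ¬ (0 ≤ index ∧ index < (elem.toList.length : Int) ∧
          PySem.Chars.isdigit (PySem.List.pyGetD elem.toList index ' ')) := by
        simp [pvQ] at h ⊢; tauto
      rw [if_neg h', eq_false_of_ne_true h]
      simp

lemma checkLoopA_replicate (n : Nat) (i : Int) :
    checkLoopA (List.replicate n i) (List.replicate n i) = decide (n ≤ 1) := by
  match n with
  | 0 => simp [checkLoopA]
  | 1 => simp [checkLoopA, PySem.List.count]
  | (m + 2) =>
    rw [show List.replicate (m + 2) i = i :: List.replicate (m + 1) i from rfl]
    unfold checkLoopA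
    rw [if_pos (by simp [PySem.List.count])]
    simp

lemma altLoop_eq (index : Int) (bs : List String) : ∀ c : Nat, c ≤ 1 →
    altLoop index bs c = decide (c + bs.countP (pvQ index) ≤ 1) := by
  induction bs with
  | nil => intro c hc; simp [altLoop]; omega
  | cons row rest ih =>
    intro c hc
    rw [List.countP_cons]
    unfold altLoop
    by_cases h : pvQ index row = true
    · have h' : (0 ≤ index ∧ index < (row.toList.length : Int)) ∧
          PySem.Chars.isdigit (PySem.List.pyGetD row.toList index ' ') := by
        simp [pvQ] at h; tauto
      rw [if_pos h', h]
      interval_cases c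
      · rw [if_neg (by omega), ih 1 (by omega)]
        simp
      · rw [if_pos (by omega)]
        simp
    · have h' : ¬ ((0 ≤ index ∧ index < (row.toList.length : Int)) ∧
          PySem.Chars.isdigit (PySem.List.pyGetD row.toList index ' ')) := by
        simp [pvQ] at h ⊢; tauto
      rw [if_neg h', eq_false_of_ne_true h, ih c hc]
      simp

-- ===== VERDICT =====
theorem check_vertical_spec : Claim_equal_check_vertical := by
  intro board index _
  unfold Spec_check_vertical check_vertical check_vertical_alt
  rw [stack_eq index board [], List.nil_append, checkLoopA_replicate,
      altLoop_eq index board 0 (by omega)]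
  simp
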